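-- pv_equiv track=rewrite | github.com/robin-pham/LC-Solutions | L844-BackspaceString.py | string_compare
-- ===== SOURCE A (Python) =====
-- def string_compare(s, t):
--     s_stack = []
--     t_stack = []
--
--     for ch in s:
--         if ch.isalpha():
--             s_stack.append(ch)
--         elif s_stack:
--             s_stack.pop()
--
--     for ch in t:
--         if ch.isalpha():
--             t_stack.append(ch)
--         elif t_stack:
--             t_stack.pop()
--
--     return s_stack == t_stack
-- ===== SOURCE B (Python) =====
-- def _clean(s):
--     # scan right-to-left with a pending-backspace counter; build survivors reversed, then flip
--     out = []
--     skip = 0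
--     for ch in reversed(s):
--         if not ch.isalpha():
--             skip += 1
--         elif skip:
--             skip -= 1
--         else:
--             out.append(ch)
--     out.reverse()
--     return out
--
-- def string_compare(s, t):
--     return _clean(s) == _clean(t)
-- ===== Notes on version B (the rewrite author's own statement) =====
-- stated objective: alternative
-- what changed: B replaces A's left-to-right stack simulation (append/pop) by a right-to-left scan per string with a pending-backspace counter that decides in one backward pass which characters survive.
import Mathlib
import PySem

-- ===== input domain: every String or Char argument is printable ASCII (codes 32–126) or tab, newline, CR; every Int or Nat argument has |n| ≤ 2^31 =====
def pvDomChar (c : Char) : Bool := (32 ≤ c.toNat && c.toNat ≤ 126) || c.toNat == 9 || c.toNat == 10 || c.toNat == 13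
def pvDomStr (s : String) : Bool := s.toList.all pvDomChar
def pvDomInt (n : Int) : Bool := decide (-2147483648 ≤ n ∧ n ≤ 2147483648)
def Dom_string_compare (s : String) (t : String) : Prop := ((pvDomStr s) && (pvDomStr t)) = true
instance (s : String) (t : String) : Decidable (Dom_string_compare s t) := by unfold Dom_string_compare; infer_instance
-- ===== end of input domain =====

-- B replaces A's left-to-right stack (append/pop) by a right-to-left scan with a
-- pending-backspace counter per string; same O(n) cost, different decomposition.

-- ===== PORT A =====
-- one iteration of A's per-string loop: append an alpha char, else pop if nonempty
def pvAStep (st : List Char) (ch : Char) : List Char :=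
  if PySem.Chars.isalpha ch then st ++ [ch]
  else if !st.isEmpty then st.dropLast
  else st

def string_compare (s : String) (t : String) : Bool :=
  (s.toList.foldl pvAStep []) == (t.toList.foldl pvAStep [])

-- ===== PORT B =====
-- one iteration of B's backward loop: state = (pending skips, survivors so far)
def pvBStep (acc : Nat × List Char) (ch : Char) : Nat × List Char :=
  if !(PySem.Chars.isalpha ch) then (acc.1 + 1, acc.2)
  else if acc.1 ≠ 0 then (acc.1 - 1, acc.2)
  else (acc.1, acc.2 ++ [ch])

def pvClean (s : String) : List Char :=
  ((s.toList.reverse.foldl pvBStep (0, [])).2).reverse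

def string_compare_alt (s : String) (t : String) : Bool :=
  pvClean s == pvClean t

-- ===== PRECONDITION & SPEC =====
def Spec_string_compare (s : String) (t : String) (out : Bool) : Prop := out = string_compare_alt s t
instance (s : String) (t : String) (out : Bool) : Decidable (Spec_string_compare s t out) := by unfold Spec_string_compare; infer_instance

-- ===== CLAIM (what is proved, stated in full; the proofs are below) =====
def Claim_equal_string_compare : Prop := ∀ (s : String) (t : String), Dom_string_compare s t → Spec_string_compare s t (string_compare s t)

-- ===== LEMMAS AND PROOFS =====

-- recursive form of B's backward loop (survivors in right-to-left order)
def pvF : Nat → List Char → List Char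
  | _, [] => []
  | k, c :: r =>
    if !(PySem.Chars.isalpha c) then pvF (k + 1) r
    else if k ≠ 0 then pvF (k - 1) r
    else c :: pvF 0 r

theorem pvFoldB (r : List Char) : ∀ (k : Nat) (out : List Char),
    (r.foldl pvBStep (k, out)).2 = out ++ pvF k r := by
  induction r with
  | nil => simp [pvF]
  | cons c r ih =>
    intro k out
    simp only [List.foldl_cons, pvBStep, pvF]
    by_cases h : PySem.Chars.isalpha c
    · by_cases hk : k ≠ 0
      · simp [h, hk, ih]
      · have hk0 : k = 0 := by omega
        subst hk0
        simp [h, ih]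
    · simp [h, ih]

-- the key invariant: processing l.reverse with k pending skips yields A's stack on l
-- with its last k elements removed, in reverse order
theorem pvF_eq (l : List Char) : ∀ (k : Nat),
    pvF k l.reverse =
      ((l.foldl pvAStep []).take ((l.foldl pvAStep []).length - k)).reverse := by
  induction l using List.reverseRecOn with
  | nil => intro k; simp [pvF]
  | append_singleton l c ih =>
    intro k
    set S := l.foldl pvAStep [] with hS
    have hfold : (l ++ [c]).foldl pvAStep [] = pvAStep S c := by
      simp [List.foldl_append, hS]
    rw [List.reverse_append, List.reverse_singleton, List.singleton_append]
    by_cases h : PySem.Chars.isalpha c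
    · have hA : pvAStep S c = S ++ [c] := by simp [pvAStep, h]
      rcases Nat.eq_zero_or_pos k with hk | hk
      · subst hk
        simp only [pvF, h, Bool.not_true, Bool.false_eq_true, if_false]
        rw [ih 0, hfold, hA]
        have htk : (S ++ [c]).take ((S ++ [c]).length - 0) = S ++ [c] :=
          List.take_of_length_le (by omega)
        rw [htk, List.reverse_append, List.reverse_singleton, List.singleton_append,
            Nat.sub_zero, List.take_length]
        simp
      · have hk' : k ≠ 0 := Nat.pos_iff_ne_zero.mp hk
        simp only [pvF, h, Bool.not_true, Bool.false_eq_true, if_false, if_pos hk']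
        rw [ih (k - 1), hfold, hA]
        have hle : S.length + 1 - k ≤ S.length := by omega
        rw [List.length_append, List.length_singleton,
            List.take_append_of_le_length hle]
        have : S.length + 1 - k = S.length - (k - 1) := by omega
        rw [this]
    · have hA : pvAStep S c = S.dropLast := by
        simp only [pvAStep, if_neg h]
        by_cases hS0 : S.isEmpty
        · simp at hS0; simp [hS0]
        · simp [hS0]
      simp only [pvF, h, Bool.not_false]
      rw [ih (k + 1), hfold, hA]
      have hd : S.dropLast.take (S.dropLast.length - k) = S.take (S.length - (k + 1)) := by
        rw [List.dropLast_eq_take, List.take_take, List.length_take]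
        congr 1
        omega
      rw [hd]
      simp

theorem pvClean_eq (s : String) : pvClean s = s.toList.foldl pvAStep [] := by
  unfold pvClean
  rw [pvFoldB, List.nil_append, pvF_eq, Nat.sub_zero, List.take_length,
      List.reverse_reverse]

-- ===== VERDICT (by name: the statement is the Claim_ definition above) =====
theorem string_compare_spec : Claim_equal_string_compare := by
  intro s t _
  unfold Spec_string_compare string_compare string_compare_alt
  rw [pvClean_eq, pvClean_eq]
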